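-- pv_equiv track=rewrite | github.com/Ian-au789/SSAFY_TIL_APS_basic | List/02_07/풍선팡2.py | paper_powder
-- ===== SOURCE A (Python) =====
-- def paper_powder(row, column, matrix):
--     di = [0, 1, 0, -1, 0]
--     dj = [0, 0, 1, 0, -1]                      # 오늘 배운 델타 탐색
--     max_powder = 0
--
--     for i in range(row):
--         for j in range(column):
--             sum_powder = 0
--             for k in range(5):
--                 ci = i + di[k]
--                 cj = j + dj[k]
--
--                 if 0 <= ci < row and 0 <= cj < column:    # 상하좌우 좌표가 범위 내에 있는 경우만
--                     sum_powder += matrix[ci][cj]          # 꽃가루 더하기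
--
--             if max_powder < sum_powder:                   # 최댓값 갱신
--                 max_powder = sum_powder
--
--     return max_powder
-- ===== SOURCE B (Python) =====
-- def paper_powder(row, column, matrix):
--     # Build four shifted copies of the grid and add them elementwise to the grid,
--     # so total[i][j] is the plus-shaped sum; answer is max of 0 and all totals.
--     # Return value only; does not mutate matrix.
--     if row <= 0 or column <= 0:
--         return 0
--     g = [r[:column] for r in matrix[:row]]
--     zrow = [0] * column
--     up = g[1:] + [zrow]
--     down = [zrow] + g[:-1]
--     left = [r[1:] + [0] for r in g]
--     right = [[0] + r[:-1] for r in g]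
--     total = [[a + b + c + d + e for a, b, c, d, e in zip(*vecs)]
--              for vecs in zip(g, up, down, left, right)]
--     return max([0] + [x for r in total for x in r])
-- ===== Notes on version B (the rewrite author's own statement) =====
-- stated objective: alternative
-- what changed: B builds four shifted copies of the clamped grid and adds them to it elementwise (staged whole-matrix passes), so every plus-shaped sum is materialized at once and the answer is one max over [0] + the flattened sums, instead of A's per-cell delta-array enumeration with an in-range branch per neighbor.
import Mathlib
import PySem

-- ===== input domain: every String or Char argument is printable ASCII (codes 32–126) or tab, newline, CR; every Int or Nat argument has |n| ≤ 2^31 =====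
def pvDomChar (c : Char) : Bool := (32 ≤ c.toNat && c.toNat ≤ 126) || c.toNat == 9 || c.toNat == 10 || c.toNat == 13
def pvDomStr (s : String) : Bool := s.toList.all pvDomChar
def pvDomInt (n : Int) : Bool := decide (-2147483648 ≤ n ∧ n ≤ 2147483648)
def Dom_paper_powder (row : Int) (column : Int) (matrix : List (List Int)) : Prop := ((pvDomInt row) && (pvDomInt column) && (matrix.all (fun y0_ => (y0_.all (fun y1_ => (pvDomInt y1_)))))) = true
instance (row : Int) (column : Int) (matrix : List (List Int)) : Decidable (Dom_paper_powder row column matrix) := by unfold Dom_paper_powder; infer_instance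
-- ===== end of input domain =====

-- B builds four shifted copies of the grid and adds them elementwise to get all
-- plus-shaped sums at once, then takes one max, instead of A's per-cell delta
-- enumeration with bounds checks (objective: alternative); return value only,
-- neither version mutates matrix.

-- ===== PORT A =====
-- matrix[ci][cj] is ported as pyGetD (total form); Pre_ guarantees the index is in range.
def paper_powder (row : Int) (column : Int) (matrix : List (List Int)) : Int :=
  let di : List Int := [0, 1, 0, -1, 0]
  let dj : List Int := [0, 0, 1, 0, -1]
  (PySem.List.pyRange 0 row 1).foldl (fun max_powder i =>
    (PySem.List.pyRange 0 column 1).foldl (fun max_powder j =>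
      let sum_powder := (PySem.List.pyRange 0 5 1).foldl (fun s k =>
        let ci := i + PySem.List.pyGetD di k 0
        let cj := j + PySem.List.pyGetD dj k 0
        if 0 ≤ ci ∧ ci < row ∧ 0 ≤ cj ∧ cj < column then
          s + PySem.List.pyGetD (PySem.List.pyGetD matrix ci []) cj 0
        else s) 0
      if max_powder < sum_powder then sum_powder else max_powder) max_powder) 0

-- ===== PORT B =====
-- zip(g, up, down, left, right) with the 5-way elementwise sum is ported as a
-- chain of List.zip followed by one map over the 5-tuples.
def pvAdd5Rows (v : ((((List Int × List Int) × List Int) × List Int) × List Int)) : List Int :=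
  (((((v.1.1.1.1.zip v.1.1.1.2).zip v.1.1.2).zip v.1.2).zip v.2).map
    (fun w => w.1.1.1.1 + w.1.1.1.2 + w.1.1.2 + w.1.2 + w.2))

def paper_powder_alt (row : Int) (column : Int) (matrix : List (List Int)) : Int :=
  if row ≤ 0 ∨ column ≤ 0 then 0 else
  let g : List (List Int) :=
    (PySem.List.slice matrix none (some row)).map
      (fun r => PySem.List.slice r none (some column))
  let zrow : List Int := List.replicate column.toNat 0
  let up : List (List Int) := PySem.List.slice g (some 1) none ++ [zrow]
  let down : List (List Int) := zrow :: PySem.List.slice g none (some (-1))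
  let left : List (List Int) := g.map (fun r => PySem.List.slice r (some 1) none ++ [0])
  let right : List (List Int) := g.map (fun r => 0 :: PySem.List.slice r none (some (-1)))
  let total : List (List Int) := ((((g.zip up).zip down).zip left).zip right).map pvAdd5Rows
  (PySem.List.max? ((0 : Int) :: total.flatMap (fun r => r)) (fun x => x)).getD 0

-- ===== PRECONDITION & SPEC =====
-- Pre_ excludes exactly the inputs on which A raises IndexError: a grid with positive
-- row and column that asks for more rows than matrix has, or whose used rows are shorter
-- than column.
def Pre_paper_powder (row : Int) (column : Int) (matrix : List (List Int)) : Prop :=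
  0 < row → 0 < column →
    row ≤ (matrix.length : Int) ∧ ∀ r ∈ matrix.take row.toNat, column ≤ (r.length : Int)
instance (row : Int) (column : Int) (matrix : List (List Int)) : Decidable (Pre_paper_powder row column matrix) := by unfold Pre_paper_powder; infer_instance
def pvWitness_paper_powder : Int × Int × List (List Int) := (2, 2, [[1, 2], [3, 4]])

def Spec_paper_powder (row : Int) (column : Int) (matrix : List (List Int)) (out : Int) : Prop := out = paper_powder_alt row column matrix
instance (row : Int) (column : Int) (matrix : List (List Int)) (out : Int) : Decidable (Spec_paper_powder row column matrix out) := by unfold Spec_paper_powder; infer_instance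

-- ===== CLAIM (what is proved, stated in full; the proofs are below) =====
def Claim_equal_paper_powder : Prop := ∀ (row : Int) (column : Int) (matrix : List (List Int)), Dom_paper_powder row column matrix → Pre_paper_powder row column matrix → Spec_paper_powder row column matrix (paper_powder row column matrix)

-- ===== LEMMAS AND PROOFS =====

-- matrix[a][b] with defaults (in range under the hypotheses where it is used)
def pvGet (matrix : List (List Int)) (a b : Int) : Int :=
  PySem.List.pyGetD (PySem.List.pyGetD matrix a []) b 0

-- one guarded step of A's inner delta loop
def pvStep (row column : Int) (matrix : List (List Int)) (s ci cj : Int) : Int :=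
  if 0 ≤ ci ∧ ci < row ∧ 0 ≤ cj ∧ cj < column then s + pvGet matrix ci cj else s

-- A's inner sum at cell (i, j), the five delta steps unrolled in A's order
def pvPlus (row column : Int) (matrix : List (List Int)) (i j : Int) : Int :=
  pvStep row column matrix
    (pvStep row column matrix
      (pvStep row column matrix
        (pvStep row column matrix
          (pvStep row column matrix 0 i j) (i + 1) j) i (j + 1)) (i - 1) j) i (j - 1)

theorem pvInner (row column : Int) (matrix : List (List Int)) (i j : Int) :
    (PySem.List.pyRange 0 5 1).foldl (fun s k =>
        let ci := i + PySem.List.pyGetD ([0, 1, 0, -1, 0] : List Int) k 0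
        let cj := j + PySem.List.pyGetD ([0, 0, 1, 0, -1] : List Int) k 0
        if 0 ≤ ci ∧ ci < row ∧ 0 ≤ cj ∧ cj < column then
          s + PySem.List.pyGetD (PySem.List.pyGetD matrix ci []) cj 0
        else s) 0 = pvPlus row column matrix i j := by
  rw [show PySem.List.pyRange 0 5 1 = [0, 1, 2, 3, 4] from by decide]
  simp only [List.foldl,
    show PySem.List.pyGetD ([0, 1, 0, -1, 0] : List Int) 0 0 = 0 from by decide,
    show PySem.List.pyGetD ([0, 1, 0, -1, 0] : List Int) 1 0 = 1 from by decide,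
    show PySem.List.pyGetD ([0, 1, 0, -1, 0] : List Int) 2 0 = 0 from by decide,
    show PySem.List.pyGetD ([0, 1, 0, -1, 0] : List Int) 3 0 = -1 from by decide,
    show PySem.List.pyGetD ([0, 1, 0, -1, 0] : List Int) 4 0 = 0 from by decide,
    show PySem.List.pyGetD ([0, 0, 1, 0, -1] : List Int) 0 0 = 0 from by decide,
    show PySem.List.pyGetD ([0, 0, 1, 0, -1] : List Int) 1 0 = 0 from by decide,
    show PySem.List.pyGetD ([0, 0, 1, 0, -1] : List Int) 2 0 = 1 from by decide,
    show PySem.List.pyGetD ([0, 0, 1, 0, -1] : List Int) 3 0 = 0 from by decide,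
    show PySem.List.pyGetD ([0, 0, 1, 0, -1] : List Int) 4 0 = -1 from by decide,
    add_zero, show ∀ x : Int, x + -1 = x - 1 from fun x => by ring, pvPlus, pvStep, pvGet]

theorem pvFoldFlat (f : Int → List Int) (l : List Int) (a : Int) :
    l.foldl (fun acc i => (f i).foldl max acc) a = (l.flatMap f).foldl max a := by
  induction l generalizing a with
  | nil => rfl
  | cons x xs ih => simp only [List.flatMap_cons, List.foldl_append, List.foldl_cons, ih]

-- A computes the running max over all pvPlus values, i.e. foldl max over the flattened list
theorem pvA_char (row column : Int) (matrix : List (List Int)) :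
    paper_powder row column matrix =
      ((PySem.List.pyRange 0 row 1).flatMap (fun i =>
        (PySem.List.pyRange 0 column 1).map (fun j => pvPlus row column matrix i j))).foldl max 0 := by
  simp only [paper_powder]
  rw [← pvFoldFlat]
  apply PySem.List.foldl_congr_mem
  intro acc i _
  rw [List.foldl_map]
  apply PySem.List.foldl_congr_mem
  intro acc2 j _
  rw [pvInner]
  rcases lt_or_ge acc2 (pvPlus row column matrix i j) with h | h
  · rw [if_pos h, max_eq_right (le_of_lt h)]
  · rw [if_neg (not_lt.mpr h), max_eq_left h]

-- B's plus sum at one cell, Int-guarded, in B's summand order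
def pvM (row column : Int) (matrix : List (List Int)) (i j : Int) : Int :=
  pvGet matrix i j
  + (if i + 1 < row then pvGet matrix (i + 1) j else 0)
  + (if 1 ≤ i then pvGet matrix (i - 1) j else 0)
  + (if j + 1 < column then pvGet matrix i (j + 1) else 0)
  + (if 1 ≤ j then pvGet matrix i (j - 1) else 0)

-- cell and row of the (clamped) grid, Nat-indexed
def pvCellOf (matrix : List (List Int)) (a b : Nat) : Int := (matrix.getD a []).getD b 0

def pvRowOf (column : Int) (matrix : List (List Int)) (a : Nat) : List Int :=
  (matrix.getD a []).take column.toNat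

-- B's plus sum at one cell, Nat-guarded
def pvN (row column : Int) (matrix : List (List Int)) (k l : Nat) : Int :=
  pvCellOf matrix k l
  + (if k + 1 < row.toNat then pvCellOf matrix (k + 1) l else 0)
  + (if 1 ≤ k then pvCellOf matrix (k - 1) l else 0)
  + (if l + 1 < column.toNat then pvCellOf matrix k (l + 1) else 0)
  + (if 1 ≤ l then pvCellOf matrix k (l - 1) else 0)

theorem pvPlus_eq_M (row column : Int) (matrix : List (List Int)) (i j : Int)
    (h0 : 0 ≤ i) (h1 : i < row) (h2 : 0 ≤ j) (h3 : j < column) :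
    pvPlus row column matrix i j = pvM row column matrix i j := by
  simp only [pvPlus, pvStep, pvM]
  split_ifs <;> omega

theorem pvGet_cell (matrix : List (List Int)) (a b : Nat) :
    pvGet matrix (a : Int) (b : Int) = pvCellOf matrix a b := by
  unfold pvGet pvCellOf
  rw [PySem.List.pyGetD_natCast, PySem.List.pyGetD_natCast]

theorem pvM_eq_N (row column : Int) (matrix : List (List Int)) (k l : Nat)
    (hrow : 0 < row) (hcol : 0 < column)
    (hk : k < row.toNat) (hl : l < column.toNat) :
    pvM row column matrix (k : Int) (l : Int) = pvN row column matrix k l := by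
  have hcell : ∀ a b : Nat, pvGet matrix (a : Int) (b : Int) = pvCellOf matrix a b :=
    fun a b => pvGet_cell matrix a b
  have e1 : ((k : Int) + 1) = ((k + 1 : Nat) : Int) := by push_cast; ring
  have e2 : ((l : Int) + 1) = ((l + 1 : Nat) : Int) := by push_cast; ring
  unfold pvM pvN
  have t1 : (if (k : Int) + 1 < row then pvGet matrix ((k : Int) + 1) (l : Int) else 0)
      = (if k + 1 < row.toNat then pvCellOf matrix (k + 1) l else 0) := by
    by_cases h : k + 1 < row.toNat
    · rw [if_pos (by omega), if_pos h, e1, hcell _ _]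
    · rw [if_neg (by omega), if_neg h]
  have t2 : (if (1 : Int) ≤ (k : Int) then pvGet matrix ((k : Int) - 1) (l : Int) else 0)
      = (if 1 ≤ k then pvCellOf matrix (k - 1) l else 0) := by
    by_cases h : 1 ≤ k
    · have e3 : ((k : Int) - 1) = ((k - 1 : Nat) : Int) := by omega
      rw [if_pos (by omega), if_pos h, e3, hcell _ _]
    · rw [if_neg (by omega), if_neg h]
  have t3 : (if (l : Int) + 1 < column then pvGet matrix (k : Int) ((l : Int) + 1) else 0)
      = (if l + 1 < column.toNat then pvCellOf matrix k (l + 1) else 0) := by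
    by_cases h : l + 1 < column.toNat
    · rw [if_pos (by omega), if_pos h, e2, hcell _ _]
    · rw [if_neg (by omega), if_neg h]
  have t4 : (if (1 : Int) ≤ (l : Int) then pvGet matrix (k : Int) ((l : Int) - 1) else 0)
      = (if 1 ≤ l then pvCellOf matrix k (l - 1) else 0) := by
    by_cases h : 1 ≤ l
    · have e4 : ((l : Int) - 1) = ((l - 1 : Nat) : Int) := by omega
      rw [if_pos (by omega), if_pos h, e4, hcell _ _]
    · rw [if_neg (by omega), if_neg h]
  rw [t1, t2, t3, t4, hcell k l]

-- value of (gs.tail ++ [z]) / (z :: gs.dropLast) at an in-range index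
theorem pvUpD {α : Type} (gs : List α) (z d : α) (k : Nat) (hk : k < gs.length) :
    (gs.tail ++ [z]).getD k d = if k + 1 < gs.length then gs.getD (k + 1) d else z := by
  have hlen : (gs.tail ++ [z]).length = gs.length := by
    simp [List.length_tail]; omega
  by_cases h : k + 1 < gs.length
  · rw [if_pos h, List.getD_eq_getElem _ _ (by omega), List.getD_eq_getElem _ _ (by omega)]
    rw [List.getElem_append_left (by simp [List.length_tail]; omega), List.getElem_tail]
  · rw [if_neg h, List.getD_eq_getElem _ _ (by omega)]
    exact List.getElem_concat_length (by simp [List.length_tail]; omega) _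

theorem pvDownD {α : Type} (gs : List α) (z d : α) (k : Nat) (hk : k < gs.length) :
    (z :: gs.dropLast).getD k d = if 1 ≤ k then gs.getD (k - 1) d else z := by
  cases k with
  | zero => simp
  | succ j =>
    rw [if_pos (by omega)]
    show (gs.dropLast).getD j d = gs.getD (j + 1 - 1) d
    rw [List.getD_eq_getElem _ _ (by simp [List.length_dropLast]; omega),
      List.getD_eq_getElem _ _ (by omega), List.getElem_dropLast]
    simp

theorem pvRowOf_len (column : Int) (matrix : List (List Int)) (a : Nat)
    (ha : column ≤ ((matrix.getD a []).length : Int)) (hcol : 0 < column) :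
    (pvRowOf column matrix a).length = column.toNat := by
  unfold pvRowOf
  rw [List.length_take]
  omega

theorem pvRowOf_cell (column : Int) (matrix : List (List Int)) (a b : Nat)
    (hb : b < column.toNat) (ha : column ≤ ((matrix.getD a []).length : Int)) :
    (pvRowOf column matrix a).getD b 0 = pvCellOf matrix a b := by
  unfold pvRowOf pvCellOf
  rw [List.getD_eq_getElem _ _ (by rw [List.length_take]; omega)]
  rw [List.getElem_take]
  exact (List.getD_eq_getElem _ _ (by omega)).symm

-- one row of B's total matrix is the row of guarded plus sums
theorem pvRow (row column : Int) (matrix : List (List Int))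
    (hrow : 0 < row) (hcol : 0 < column)
    (hrows : ∀ a : Nat, a < row.toNat → column ≤ ((matrix.getD a []).length : Int))
    (k : Nat) (hk : k < row.toNat) :
    pvAdd5Rows ((((pvRowOf column matrix k,
        if k + 1 < row.toNat then pvRowOf column matrix (k + 1) else List.replicate column.toNat 0),
        if 1 ≤ k then pvRowOf column matrix (k - 1) else List.replicate column.toNat 0),
        (pvRowOf column matrix k).tail ++ [0]),
        0 :: (pvRowOf column matrix k).dropLast)
      = (PySem.List.pyRange 0 column 1).map (fun j => pvPlus row column matrix (k : Int) j) := by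
  have hclen : (pvRowOf column matrix k).length = column.toNat :=
    pvRowOf_len column matrix k (hrows k hk) hcol
  have hulen : (if k + 1 < row.toNat then pvRowOf column matrix (k + 1)
      else List.replicate column.toNat 0).length = column.toNat := by
    split
    · exact pvRowOf_len column matrix (k + 1) (hrows (k + 1) (by omega)) hcol
    · simp
  have hdlen : (if 1 ≤ k then pvRowOf column matrix (k - 1)
      else List.replicate column.toNat 0).length = column.toNat := by
    split
    · exact pvRowOf_len column matrix (k - 1) (hrows (k - 1) (by omega)) hcol
    · simp
  have hllen : ((pvRowOf column matrix k).tail ++ [(0 : Int)]).length = column.toNat := by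
    simp [List.length_tail, hclen]; omega
  have hrlen : ((0 : Int) :: (pvRowOf column matrix k).dropLast).length = column.toNat := by
    simp [List.length_dropLast, hclen]; omega
  apply List.ext_getElem
  · simp only [pvAdd5Rows, List.length_map, List.length_zip, hclen, hulen, hdlen, hllen,
      hrlen, PySem.List.length_pyRange_one, min_self]
    omega
  · intro l hL hR
    have hl : l < column.toNat := by
      simpa only [pvAdd5Rows, List.length_map, List.length_zip, hclen, hulen, hdlen, hllen,
        hrlen, min_self] using hL
    simp only [pvAdd5Rows, List.getElem_map, List.getElem_zip]
    rw [PySem.List.getElem_pyRange_one]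
    simp only [zero_add]
    rw [pvPlus_eq_M row column matrix _ _ (by positivity) (by omega) (by positivity) (by omega)]
    rw [pvM_eq_N row column matrix k l hrow hcol hk hl]
    -- compute the five components, via getD
    have gc : (pvRowOf column matrix k)[l]'(by omega) = pvCellOf matrix k l := by
      rw [← List.getD_eq_getElem _ (0 : Int) (by omega)]
      exact pvRowOf_cell column matrix k l hl (hrows k hk)
    have gu : (if k + 1 < row.toNat then pvRowOf column matrix (k + 1)
        else List.replicate column.toNat 0)[l]'(by omega)
        = (if k + 1 < row.toNat then pvCellOf matrix (k + 1) l else 0) := by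
      split
      · rename_i hcase
        have hplen : (pvRowOf column matrix (k + 1)).length = column.toNat :=
          pvRowOf_len column matrix (k + 1) (hrows (k + 1) (by omega)) hcol
        rw [← List.getD_eq_getElem _ (0 : Int) (by omega)]
        exact pvRowOf_cell column matrix (k + 1) l hl (hrows (k + 1) (by omega))
      · exact List.getElem_replicate _
    have gd : (if 1 ≤ k then pvRowOf column matrix (k - 1)
        else List.replicate column.toNat 0)[l]'(by omega)
        = (if 1 ≤ k then pvCellOf matrix (k - 1) l else 0) := by
      split
      · rename_i hcase
        have hplen : (pvRowOf column matrix (k - 1)).length = column.toNat :=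
          pvRowOf_len column matrix (k - 1) (hrows (k - 1) (by omega)) hcol
        rw [← List.getD_eq_getElem _ (0 : Int) (by omega)]
        exact pvRowOf_cell column matrix (k - 1) l hl (hrows (k - 1) (by omega))
      · exact List.getElem_replicate _
    have gl : ((pvRowOf column matrix k).tail ++ [(0 : Int)])[l]'(by omega)
        = (if l + 1 < column.toNat then pvCellOf matrix k (l + 1) else 0) := by
      rw [← List.getD_eq_getElem _ (0 : Int) (by omega)]
      rw [pvUpD _ _ _ l (by omega), hclen]
      split
      · exact pvRowOf_cell column matrix k (l + 1) (by assumption) (hrows k hk)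
      · rfl
    have gr : ((0 : Int) :: (pvRowOf column matrix k).dropLast)[l]'(by omega)
        = (if 1 ≤ l then pvCellOf matrix k (l - 1) else 0) := by
      rw [← List.getD_eq_getElem _ (0 : Int) (by omega)]
      rw [pvDownD _ _ _ l (by omega)]
      split
      · exact pvRowOf_cell column matrix k (l - 1) (by omega) (hrows k hk)
      · rfl
    rw [gc, gu, gd, gl, gr]
    rfl

-- B computes the same foldl max over the flattened list of guarded plus sums
theorem pvB_char (row column : Int) (matrix : List (List Int))
    (hrow : 0 < row) (hcol : 0 < column)
    (hlen : row ≤ (matrix.length : Int))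
    (hrowsM : ∀ r ∈ matrix.take row.toNat, column ≤ (r.length : Int)) :
    paper_powder_alt row column matrix =
      ((PySem.List.pyRange 0 row 1).flatMap (fun i =>
        (PySem.List.pyRange 0 column 1).map (fun j => pvPlus row column matrix i j))).foldl max 0 := by
  have hrows : ∀ a : Nat, a < row.toNat → column ≤ ((matrix.getD a []).length : Int) := by
    intro a ha
    have haM : a < matrix.length := by omega
    have hmem : matrix.getD a [] ∈ matrix.take row.toNat := by
      rw [List.getD_eq_getElem _ _ haM]
      have hta : a < (matrix.take row.toNat).length := by simp [List.length_take]; omega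
      have : (matrix.take row.toNat)[a]'hta = matrix[a]'haM := List.getElem_take
      rw [← this]
      exact List.getElem_mem _
    exact hrowsM _ hmem
  simp only [paper_powder_alt]
  rw [if_neg (by omega)]
  rw [PySem.List.slice_to matrix (by omega)]
  simp only [PySem.List.slice_from_one, PySem.List.slice_to_neg_one]
  rw [show (matrix.take row.toNat).map (fun r => PySem.List.slice r none (some column))
      = (matrix.take row.toNat).map (fun r => r.take column.toNat) from
    List.map_congr_left (fun r _ => PySem.List.slice_to r (by omega))]
  set g : List (List Int) := (matrix.take row.toNat).map (fun r => r.take column.toNat)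
    with hgdef
  have hglen : g.length = row.toNat := by
    simp [hgdef, List.length_take]; omega
  have hgD : ∀ a : Nat, a < row.toNat → g.getD a [] = pvRowOf column matrix a := by
    intro a ha
    have haM : a < matrix.length := by omega
    rw [List.getD_eq_getElem _ _ (by omega)]
    simp only [hgdef, List.getElem_map, List.getElem_take]
    unfold pvRowOf
    rw [List.getD_eq_getElem _ _ haM]
  have htot : ((((g.zip (g.tail ++ [List.replicate column.toNat (0 : Int)])).zip
        (List.replicate column.toNat (0 : Int) :: g.dropLast)).zip
        (g.map (fun r => r.tail ++ [0]))).zip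
        (g.map (fun r => 0 :: r.dropLast))).map pvAdd5Rows
      = (PySem.List.pyRange 0 row 1).map (fun i =>
          (PySem.List.pyRange 0 column 1).map (fun j => pvPlus row column matrix i j)) := by
    apply List.ext_getElem
    · simp only [List.length_map, List.length_zip, List.length_append, List.length_tail,
        List.length_dropLast, List.length_cons, hglen,
        PySem.List.length_pyRange_one]
      omega
    · intro k h1 h2
      have hk : k < row.toNat := by
        simp only [List.length_map, List.length_zip, List.length_append, List.length_tail,
          List.length_dropLast, List.length_cons, hglen] at h1
        omega
      simp only [List.getElem_map, List.getElem_zip]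
      rw [PySem.List.getElem_pyRange_one]
      simp only [zero_add]
      have gk : ∀ (h : k < g.length), g[k]'h = pvRowOf column matrix k := by
        intro h
        rw [← List.getD_eq_getElem _ [] h]
        exact hgD k hk
      have gu : (g.tail ++ [List.replicate column.toNat (0 : Int)])[k]'(by
            simp [List.length_tail, hglen]; omega)
          = (if k + 1 < row.toNat then pvRowOf column matrix (k + 1)
             else List.replicate column.toNat 0) := by
        rw [← List.getD_eq_getElem _ [] (by simp [List.length_tail, hglen]; omega)]
        rw [pvUpD g _ [] k (by omega), hglen]
        split
        · exact hgD (k + 1) (by assumption)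
        · rfl
      have gd : (List.replicate column.toNat (0 : Int) :: g.dropLast)[k]'(by
            simp [List.length_dropLast, hglen]; omega)
          = (if 1 ≤ k then pvRowOf column matrix (k - 1)
             else List.replicate column.toNat 0) := by
        rw [← List.getD_eq_getElem _ [] (by simp [List.length_dropLast, hglen]; omega)]
        rw [pvDownD g _ [] k (by omega)]
        split
        · exact hgD (k - 1) (by omega)
        · rfl
      rw [gk, gu, gd]
      exact pvRow row column matrix hrow hcol hrows k hk
  rw [htot]
  rw [show ((PySem.List.pyRange 0 row 1).map (fun i =>
      (PySem.List.pyRange 0 column 1).map (fun j => pvPlus row column matrix i j))).flatMap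
        (fun r => r)
      = (PySem.List.pyRange 0 row 1).flatMap (fun i =>
          (PySem.List.pyRange 0 column 1).map (fun j => pvPlus row column matrix i j)) from by
    rw [List.flatMap_map]]
  rw [PySem.List.max?_id_cons]
  rfl

theorem pvFoldlConst (l : List Int) (a : Int) : l.foldl (fun acc _ => acc) a = a := by
  induction l generalizing a with
  | nil => rfl
  | cons x xs ih => exact ih a

theorem pv_main (row column : Int) (matrix : List (List Int))
    (hpre : 0 < row → 0 < column →
      row ≤ (matrix.length : Int) ∧ ∀ r ∈ matrix.take row.toNat, column ≤ (r.length : Int)) :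
    paper_powder row column matrix = paper_powder_alt row column matrix := by
  by_cases hz : row ≤ 0 ∨ column ≤ 0
  · simp only [paper_powder_alt]
    rw [if_pos hz]
    simp only [paper_powder]
    rcases hz with hz | hz
    · rw [PySem.List.pyRange_one_eq_nil (show row ≤ 0 by omega)]
      rfl
    · rw [PySem.List.pyRange_one_eq_nil (show column ≤ 0 by omega)]
      simp only [List.foldl_nil]
      exact pvFoldlConst _ _
  · have hrow : 0 < row := by omega
    have hcol : 0 < column := by omega
    obtain ⟨hlen, hrows⟩ := hpre hrow hcol
    rw [pvA_char, pvB_char row column matrix hrow hcol hlen hrows]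

-- ===== VERDICT (by name: the statement is the Claim_ definition above) =====
theorem paper_powder_spec : Claim_equal_paper_powder := by
  intro row column matrix _hdom hpre
  exact pv_main row column matrix hpre
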